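-- pv_equiv track=rewrite | github.com/spacy-pl/paper | spacy_pl/lemmatizer/convert_ispell_to_json_rules.py | parse_aff_lines
-- ===== SOURCE A (Python) =====
-- from collections import defaultdict
--
-- def get_rule(aff_code):
--     lemma_suf, ends = aff_code.split('>')
--     if ',' in ends:
--         lemma_end, word_end = ends.split(',')
--         lemma_end = lemma_end.strip()[1:]
--         word_end = word_end.strip()
--         word_suf = lemma_suf[:-len(lemma_end)] + word_end
--     else:
--         word_end = ends
--         word_suf = lemma_suf + word_end
--     return [word_suf, lemma_suf]
--
-- def read_flag(lines):
--     flag = "NO_FLAG"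
--     for aff_code, comment in lines:
--         if aff_code.startswith('flag*'):
--             flag = aff_code[5]
--         else:
--             yield flag, aff_code, comment
--
-- def extract_information(lines):
--     lines = [l.strip() for l in lines]
--     lines = skip_uninteresting(lines)
--     lines = [l.replace('\t', '') for l in lines]
--     # remove empty
--     lines = [l for l in lines if l.replace(' ', '') != '']
--     lines = [split_on_comment(line) for line in lines]
--     lines = [l for l in lines if l[0] != '' or l[1] != '']
--     return lines
--
-- def skip_uninteresting(lines):
--     i = 0
--     while "suffixes" not in lines[i]:
--         i += 1
--     return lines[(i+1):]
--
-- def split_on_comment(line):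
--     if line[0] == '#':
--         comment = line[1:]
--         aff_code = ''
--     else:
--         splitted = line.split("#")
--         aff_code = splitted[0]
--         if len(splitted) > 1:
--             comment = splitted[1]
--         else:
--             comment = ''
--     return aff_code.strip().replace(' ', ''), comment.strip()
--
-- def parse_aff_lines(lines):
--     processed = extract_information(lines)
--
--     rule_groups = defaultdict(list)
--     comments = defaultdict(list)
--     for flag, aff_code, comment in read_flag(processed):
--         # case: comment line
--         if aff_code == '' and comment != '':
--             comments[flag].append(comment)
--         # case: rule line
--         elif aff_code != '':
--             rule = get_rule(aff_code)
--             rule_groups[flag].append(rule)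
--         else:
--             raise Exception(
--                 "Unexpected empty line! (on flag: {})".format(flag))
--
--     return rule_groups, comments
-- ===== SOURCE B (Python) =====
-- def get_rule(aff_code):
--     lemma_suf, ends = aff_code.split('>')
--     if ',' in ends:
--         lemma_end, word_end = ends.split(',')
--         lemma_end = lemma_end.strip()[1:]
--         word_end = word_end.strip()
--         word_suf = lemma_suf[:-len(lemma_end)] + word_end
--     else:
--         word_end = ends
--         word_suf = lemma_suf + word_end
--     return [word_suf, lemma_suf]
--
-- def split_on_comment(line):
--     if line[:1] == '#':
--         comment = line[1:]
--         aff_code = ''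
--     else:
--         splitted = line.split("#")
--         aff_code = splitted[0]
--         comment = splitted[1] if len(splitted) > 1 else ''
--     return aff_code.strip().replace(' ', ''), comment.strip()
--
-- def parse_aff_lines(lines):
--     stripped = [l.strip() for l in lines]
--     start = [i for i, l in enumerate(stripped) if "suffixes" in l][0] + 1
--     pairs = [split_on_comment(l.replace('\t', ''))
--              for l in stripped[start:]
--              if l.replace('\t', '').replace(' ', '') != '']
--     pairs = [p for p in pairs if p != ('', '')]
--
--     rule_groups = {}
--     comments = {}
--
--     def emit(flag, block):
--         # digest one whole uniform-flag block at once
--         rules = [get_rule(a) for a, _ in block if a != '']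
--         cmts = [c for a, c in block if a == '']
--         if rules:
--             rule_groups.setdefault(flag, []).extend(rules)
--         if cmts:
--             comments.setdefault(flag, []).extend(cmts)
--
--     def process(ps, flag):
--         # recursion on the block structure: split at the first flag header
--         for i, (a, _) in enumerate(ps):
--             if a.startswith('flag*'):
--                 emit(flag, ps[:i])
--                 process(ps[i + 1:], a[5])
--                 return
--         emit(flag, ps)
--
--     process(pairs, 'NO_FLAG')
--     return rule_groups, comments
-- ===== Notes on version B (the rewrite author's own statement) =====
-- stated objective: alternative
-- what changed: A streams the preprocessed lines one by one through a flag state machine (read_flag generator) appending to the dicts per line; B instead decomposes the input into flag-delimited BLOCKS by recursion (split at each 'flag*' header), digests each uniform-flag block wholesale (rules/comments collected by comprehensions) and extends each dict once per block.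
import Mathlib
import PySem

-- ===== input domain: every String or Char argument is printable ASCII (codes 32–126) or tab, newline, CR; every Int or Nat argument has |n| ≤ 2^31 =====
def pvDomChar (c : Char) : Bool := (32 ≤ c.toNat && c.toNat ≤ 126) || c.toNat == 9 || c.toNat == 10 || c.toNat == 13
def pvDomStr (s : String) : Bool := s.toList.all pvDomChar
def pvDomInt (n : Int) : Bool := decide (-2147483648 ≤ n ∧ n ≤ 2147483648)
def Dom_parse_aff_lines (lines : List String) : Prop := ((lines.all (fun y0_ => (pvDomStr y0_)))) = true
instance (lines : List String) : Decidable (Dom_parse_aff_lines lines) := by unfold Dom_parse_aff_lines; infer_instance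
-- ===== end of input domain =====

-- B replaces A's streaming pipeline (six staged passes + a per-line flag state machine feeding
-- per-line dict appends) by a RECURSIVE BLOCK DECOMPOSITION: the preprocessed pairs are split at
-- each 'flag*' header, each uniform-flag block is digested WHOLESALE (its rules and comments
-- collected by comprehensions, the two dicts extended once per block), and the function recurses
-- on the remainder with the new flag; objective: alternative decomposition, same return value.

-- ===== PORT A =====
-- shared helper: A's get_rule (B's Python carries the identical function).
-- ValueError branches (split('>') / split(',') unpack failing) return []: excluded by Pre_.
def get_rule (aff_code : String) : List String :=
  match PySem.Str.split? aff_code ">" with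
  | some [lemma_suf, ends] =>
    if PySem.Str.isIn "," ends then
      match PySem.Str.split? ends "," with
      | some [le, we] =>
        let lemma_end := PySem.Str.slice (PySem.Str.strip le) (some 1) none
        let word_end := PySem.Str.strip we
        let word_suf :=
          (PySem.Str.slice lemma_suf none (some (-(PySem.Str.len lemma_end : Int)))) ++ word_end
        [word_suf, lemma_suf]
      | _ => []
    else
      [lemma_suf ++ ends, lemma_suf]
  | _ => []

-- shared helper: A's split_on_comment (B's Python carries it with line[:1] == '#', which on every
-- string means exactly "first character exists and is '#'", i.e. the pyGet? test below).
def split_on_comment (line : String) : String × String :=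
  let p : String × String :=
    if PySem.Str.pyGet? line 0 = some '#' then
      ("", PySem.Str.slice line (some 1) none)
    else
      match PySem.Str.split? line "#" with
      | some (a :: rest) => (a, match rest with | c :: _ => c | [] => "")
      | _ => (line, "")  -- unreachable: "#" ≠ ""
  (PySem.Str.replace (PySem.Str.strip p.1) " " "", PySem.Str.strip p.2)

-- while "suffixes" not in lines[i]: i += 1; return lines[i+1:]  (IndexError on exhaustion: Pre_ excludes it; [] here)
def skip_uninteresting : List String → List String
  | [] => []
  | x :: xs => if PySem.Str.isIn "suffixes" x then xs else skip_uninteresting xs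

def extract_information (lines : List String) : List (String × String) :=
  let l1 := lines.map PySem.Str.strip
  let l2 := skip_uninteresting l1
  let l3 := l2.map (fun l => PySem.Str.replace l "\t" "")
  let l4 := l3.filter (fun l => !(PySem.Str.replace l " " "" == ""))
  let l5 := l4.map split_on_comment
  l5.filter (fun p => !(p.1 == "") || !(p.2 == ""))

-- flag = aff_code[5]; IndexError (aff_code = "flag*") excluded by Pre_: flag kept then
def read_flag : String → List (String × String) → List (String × String × String)
  | _, [] => []
  | flag, (a, c) :: t =>
    if PySem.Str.startswith a "flag*" then
      read_flag (match PySem.Str.pyGet? a 5 with | some ch => String.ofList [ch] | none => flag) t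
    else (flag, a, c) :: read_flag flag t

-- the body of A's for-loop (defaultdict(list) append = modify with default []);
-- the final 'raise Exception("Unexpected empty line!")' branch is unreachable (such lines were filtered): state kept
def mainstep (s : PySem.Dict String (List (List String)) × PySem.Dict String (List String))
    (t : String × String × String) :
    PySem.Dict String (List (List String)) × PySem.Dict String (List String) :=
  if t.2.1 == "" && !(t.2.2 == "") then (s.1, s.2.modify t.1 [] (· ++ [t.2.2]))
  else if !(t.2.1 == "") then (s.1.modify t.1 [] (· ++ [get_rule t.2.1]), s.2)
  else s

def parse_aff_lines (lines : List String) :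
    (List (String × List (List String))) × (List (String × List String)) :=
  let processed := extract_information lines
  let res := (read_flag "NO_FLAG" processed).foldl mainstep (PySem.Dict.empty, PySem.Dict.empty)
  (res.1.items, res.2.items)

-- ===== PORT B =====
-- B's emit: digest one whole uniform-flag block at once; setdefault(flag, []).extend(xs) on a
-- Python dict is exactly setdefault followed by modify with (· ++ xs)
def emitB (flag : String) (block : List (String × String))
    (st : PySem.Dict String (List (List String)) × PySem.Dict String (List String)) :
    PySem.Dict String (List (List String)) × PySem.Dict String (List String) :=
  let rules := (block.filter (fun p => !(p.1 == ""))).map (fun p => get_rule p.1)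
  let cmts := (block.filter (fun p => p.1 == "")).map (fun p => p.2)
  let rg := if rules == [] then st.1 else (st.1.setdefault flag []).modify flag [] (· ++ rules)
  let cm := if cmts == [] then st.2 else (st.2.setdefault flag []).modify flag [] (· ++ cmts)
  (rg, cm)

-- B's process: find the first 'flag*' header (Python's enumerate loop = findIdx), emit the block
-- before it (ps[:i] = take i), recurse after it (ps[i+1:] = drop (i+1)) with the new flag;
-- a[5] on a 5-char 'flag*' would raise IndexError (excluded by Pre_): flag kept here
def processB (ps : List (String × String)) (flag : String)
    (st : PySem.Dict String (List (List String)) × PySem.Dict String (List String)) :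
    PySem.Dict String (List (List String)) × PySem.Dict String (List String) :=
  let i := ps.findIdx (fun p => PySem.Str.startswith p.1 "flag*")
  if h : i < ps.length then
    processB (ps.drop (i + 1))
      (match PySem.Str.pyGet? (ps[i].1) 5 with | some ch => String.ofList [ch] | none => flag)
      (emitB flag (ps.take i) st)
  else emitB flag ps st
termination_by ps.length
decreasing_by simp; omega

-- start = [i for i, l in enumerate(stripped) if "suffixes" in l][0] + 1 ; IndexError on the
-- empty hit list is excluded by Pre_ ( ([], []) here), then preprocess and recurse on blocks
def parse_aff_lines_alt (lines : List String) :
    (List (String × List (List String))) × (List (String × List String)) :=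
  let stripped := lines.map PySem.Str.strip
  match (PySem.List.enumerate stripped 0).filter (fun p => PySem.Str.isIn "suffixes" p.2) with
  | [] => ([], [])
  | (i, _) :: _ =>
    let rest := PySem.List.slice stripped (some (i + 1)) none
    let pairs0 := (rest.filter
        (fun l => !(PySem.Str.replace (PySem.Str.replace l "\t" "") " " "" == ""))).map
      (fun l => split_on_comment (PySem.Str.replace l "\t" ""))
    let pairs := pairs0.filter (fun p => !(p == ("", "")))
    let s := processB pairs "NO_FLAG" (PySem.Dict.empty, PySem.Dict.empty)
    (s.1.items, s.2.items)

-- ===== PRECONDITION & SPEC =====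
-- per-line check used by Pre_: on a stripped line that survives A's filters, A raises
-- IndexError if the affix code is exactly "flag*", and ValueError in get_rule unless the
-- code has exactly one '>' with at most one ',' after it
def pvAffOK (line : String) : Bool :=
  let l := PySem.Str.replace line "\t" ""
  if PySem.Str.replace l " " "" == "" then true
  else
    let p := split_on_comment l
    if p.1 == "" then true
    else if PySem.Str.startswith p.1 "flag*" then !(p.1 == "flag*")
    else
      match PySem.Str.split? p.1 ">" with
      | some [_, ends] =>
        match PySem.Str.split? ends "," with
        | some [_] => true
        | some [_, _] => true
        | _ => false
      | _ => false

-- Pre_ = exactly the inputs on which Python A returns: some line contains "suffixes" after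
-- stripping (else IndexError), and every line after the first such one passes pvAffOK
def Pre_parse_aff_lines (lines : List String) : Prop :=
  ∃ i < lines.length, PySem.Str.isIn "suffixes" (PySem.Str.strip lines[i]!) = true ∧
    (∀ j < i, PySem.Str.isIn "suffixes" (PySem.Str.strip lines[j]!) = false) ∧
    (∀ l ∈ lines.drop (i + 1), pvAffOK (PySem.Str.strip l) = true)
instance (lines : List String) : Decidable (Pre_parse_aff_lines lines) := by
  unfold Pre_parse_aff_lines; infer_instance

def pvWitness_parse_aff_lines : List String := ["suffixes", "flag*T:", "ab>c, -b", "# note", "x>y"]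

def Spec_parse_aff_lines (lines : List String)
    (out : (List (String × List (List String))) × (List (String × List String))) : Prop :=
  out = parse_aff_lines_alt lines
instance (lines : List String)
    (out : (List (String × List (List String))) × (List (String × List String))) :
    Decidable (Spec_parse_aff_lines lines out) := by unfold Spec_parse_aff_lines; infer_instance

-- ===== CLAIM (what is proved, stated in full; the proofs are below) =====
def Claim_equal_parse_aff_lines : Prop := ∀ (lines : List String), Dom_parse_aff_lines lines → Pre_parse_aff_lines lines → Spec_parse_aff_lines lines (parse_aff_lines lines)

-- ===== LEMMAS AND PROOFS =====

-- two modifies at the same key compose (Dict.modify is insert of f (getD))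
lemma modify_modify {ν : Type} (d : PySem.Dict String ν) (k : String) (d0 : ν) (f g : ν → ν) :
    (d.modify k d0 f).modify k d0 g = d.modify k d0 (fun v => g (f v)) := by
  simp [PySem.Dict.modify, PySem.Dict.getD_insert_self, PySem.Dict.insert_insert_self]

-- setdefault before a modify at the same key with the same default is absorbed
lemma setdefault_modify {ν : Type} (d : PySem.Dict String ν) (k : String) (d0 : ν) (g : ν → ν) :
    (d.setdefault k d0).modify k d0 g = d.modify k d0 g := by
  by_cases h : d.contains k = true
  · rw [PySem.Dict.setdefault_of_contains d d0 h]
  · rw [PySem.Dict.setdefault_of_not_contains d d0 (by simpa using h)]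
    simp [PySem.Dict.modify, PySem.Dict.getD_insert_self, PySem.Dict.insert_insert_self,
      PySem.Dict.getD_of_not_contains d d0 (by simpa using h)]

-- setdefault after a modify at the same key is the identity (the key is present)
lemma modify_setdefault {ν : Type} (d : PySem.Dict String ν) (k : String) (d0 v : ν) (f : ν → ν) :
    (d.modify k d0 f).setdefault k v = d.modify k d0 f := by
  apply PySem.Dict.setdefault_of_contains
  simp [PySem.Dict.contains_modify]

-- peeling one pair off emitB is one step of A's loop body
lemma emitB_cons (f a c : String) (t : List (String × String)) (h : a = "" → c ≠ "")
    (st : PySem.Dict String (List (List String)) × PySem.Dict String (List String)) :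
    emitB f ((a, c) :: t) st = emitB f t (mainstep st (f, a, c)) := by
  by_cases ha : a = ""
  · have hc : (c == "") = false := by simpa using h ha
    subst ha
    have hfr : List.filter (fun p => !(p.1 == "")) ((("" : String), c) :: t)
        = List.filter (fun p => !(p.1 == "")) t := by simp
    have hfc : List.filter (fun p : String × String => p.1 == "") ((("" : String), c) :: t)
        = ("", c) :: List.filter (fun p : String × String => p.1 == "") t := by simp
    have hm : mainstep st (f, "", c) = (st.1, st.2.modify f [] (· ++ [c])) := by
      simp [mainstep, hc]
    rw [hm]
    simp only [emitB, hfr, hfc, List.map_cons]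
    congr 1
    have hne : ((c :: List.map (fun p : String × String => p.2)
        (List.filter (fun p : String × String => p.1 == "") t)) == ([] : List String)) = false := rfl
    rw [if_neg (by simp [hne])]
    by_cases hct : List.map (fun p : String × String => p.2)
        (List.filter (fun p : String × String => p.1 == "") t) = []
    · rw [hct, if_pos (by simp)]
      rw [setdefault_modify]
    · rw [if_neg (by simpa using hct)]
      rw [modify_setdefault, modify_modify, setdefault_modify]
      congr 1
      funext v
      simp
  · have ha' : (a == "") = false := by simpa using ha
    have hfr : List.filter (fun p => !(p.1 == "")) ((a, c) :: t)
        = (a, c) :: List.filter (fun p => !(p.1 == "")) t := by simp [ha']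
    have hfc : List.filter (fun p : String × String => p.1 == "") ((a, c) :: t)
        = List.filter (fun p : String × String => p.1 == "") t := by simp [ha']
    have hm : mainstep st (f, a, c) = (st.1.modify f [] (· ++ [get_rule a]), st.2) := by
      simp [mainstep, ha']
    rw [hm]
    simp only [emitB, hfr, hfc, List.map_cons]
    congr 1
    have hne : ((get_rule a :: List.map (fun p : String × String => get_rule p.1)
        (List.filter (fun p : String × String => !(p.1 == "")) t)) == ([] : List (List String))) = false := rfl
    rw [if_neg (by simp [hne])]
    by_cases hrt : List.map (fun p : String × String => get_rule p.1)
        (List.filter (fun p : String × String => !(p.1 == "")) t) = []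
    · rw [hrt, if_pos (by simp)]
      rw [setdefault_modify]
    · rw [if_neg (by simpa using hrt)]
      rw [modify_setdefault, modify_modify, setdefault_modify]
      congr 1
      funext v
      simp

-- the emit of one whole uniform-flag block equals A's per-line dict loop over that block
lemma emit_eq (f : String) (xs : List (String × String))
    (hxs : ∀ p ∈ xs, p.1 = "" → p.2 ≠ "")
    (st : PySem.Dict String (List (List String)) × PySem.Dict String (List String)) :
    emitB f xs st = (xs.map (fun p => (f, p.1, p.2))).foldl mainstep st := by
  induction xs generalizing st with
  | nil => simp [emitB]
  | cons p t ih =>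
    obtain ⟨a, c⟩ := p
    rw [emitB_cons f a c t (fun h1 => hxs (a, c) (by simp) h1) st,
      ih (fun q hq => hxs q (by simp [hq])), List.map_cons, List.foldl_cons]

-- read_flag over a header-free prefix yields it tagged with the current flag
lemma read_flag_append_free (f : String) (xs ys : List (String × String))
    (hxs : ∀ p ∈ xs, PySem.Str.startswith p.1 "flag*" = false) :
    read_flag f (xs ++ ys) = xs.map (fun p => (f, p.1, p.2)) ++ read_flag f ys := by
  induction xs with
  | nil => simp
  | cons p t ih =>
    obtain ⟨a, c⟩ := p
    have h := hxs (a, c) (by simp)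
    simp only [List.cons_append, read_flag, h, Bool.false_eq_true, if_false,
      List.map_cons, List.cons_append]
    rw [ih (fun q hq => hxs q (by simp [hq]))]

-- on a 'flag*' header line read_flag only updates the flag
lemma read_flag_cons_flag (f : String) {p : String × String} (t : List (String × String))
    (h : PySem.Str.startswith p.1 "flag*" = true) :
    read_flag f (p :: t) =
      read_flag (match PySem.Str.pyGet? p.1 5 with
                 | some ch => String.ofList [ch] | none => f) t := by
  obtain ⟨a, c⟩ := p
  have h' : PySem.Str.startswith a "flag*" = true := h
  simp only [read_flag, h', if_true]

-- B's recursion on blocks computes A's read_flag + per-line dict loop (strong induction on length)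
lemma processB_eq_aux (n : Nat) : ∀ (ps : List (String × String)), ps.length ≤ n →
    ∀ (f : String)
      (st : PySem.Dict String (List (List String)) × PySem.Dict String (List String)),
    (∀ p ∈ ps, p.1 = "" → p.2 ≠ "") →
    processB ps f st = (read_flag f ps).foldl mainstep st := by
  induction n with
  | zero =>
    intro ps hlen f st _
    have : ps = [] := List.length_eq_zero_iff.mp (Nat.le_zero.mp hlen)
    subst this
    rw [processB]
    simp [read_flag, emitB]
  | succ n ih =>
    intro ps hlen f st hps
    rw [processB]
    by_cases h : ps.findIdx (fun p => PySem.Str.startswith p.1 "flag*") < ps.length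
    · rw [dif_pos h]
      set i := ps.findIdx (fun p => PySem.Str.startswith p.1 "flag*") with hi
      have hdecomp : ps = ps.take i ++ (ps[i] :: ps.drop (i + 1)) := by
        rw [← List.drop_eq_getElem_cons h, List.take_append_drop]
      have htake : ∀ p ∈ ps.take i, PySem.Str.startswith p.1 "flag*" = false := by
        intro p hp
        obtain ⟨j, hj, hget⟩ := List.mem_take_iff_getElem.mp hp
        have hji : j < ps.findIdx (fun p => PySem.Str.startswith p.1 "flag*") := by
          have := Nat.lt_min.mp hj
          omega
        have := List.not_of_lt_findIdx hji
        exact hget ▸ this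
      have hhit : PySem.Str.startswith (ps[i].1) "flag*" = true := by
        have := List.findIdx_getElem (p := fun p => PySem.Str.startswith p.1 "flag*")
          (xs := ps) (w := h)
        simpa using this
      conv_rhs => rw [hdecomp]
      rw [read_flag_append_free f _ _ htake, List.foldl_append,
        read_flag_cons_flag f _ hhit, ← emit_eq f _
          (fun q hq => hps q (List.mem_of_mem_take hq)) st]
      exact ih (ps.drop (i + 1)) (by simp; omega) _ _
        (fun q hq => hps q (List.mem_of_mem_drop hq))
    · rw [dif_neg h]
      have hall : ∀ p ∈ ps, (fun p => PySem.Str.startswith p.1 "flag*") p = false :=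
        List.findIdx_eq_length.mp
          (Nat.le_antisymm List.findIdx_le_length (Nat.le_of_not_lt h))
      have : read_flag f ps = ps.map (fun p => (f, p.1, p.2)) := by
        have := read_flag_append_free f ps [] hall
        simpa [read_flag] using this
      rw [this, ← emit_eq f ps hps st]

lemma processB_eq (ps : List (String × String)) (f : String)
    (st : PySem.Dict String (List (List String)) × PySem.Dict String (List String))
    (hps : ∀ p ∈ ps, p.1 = "" → p.2 ≠ "") :
    processB ps f st = (read_flag f ps).foldl mainstep st :=
  processB_eq_aux ps.length ps le_rfl f st hps

-- proof-local: A's pipeline stages after the header skip, as one function of the suffix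
def postA (l2 : List String) : List (String × String) :=
  ((((l2.map (fun l => PySem.Str.replace l "\t" "")).filter
      (fun l => !(PySem.Str.replace l " " "" == ""))).map split_on_comment).filter
    (fun p => !(p.1 == "") || !(p.2 == "")))

-- proof-local: B's fused preprocessing of the same suffix
def pairsB (l2 : List String) : List (String × String) :=
  ((l2.filter
      (fun l => !(PySem.Str.replace (PySem.Str.replace l "\t" "") " " "" == ""))).map
    (fun l => split_on_comment (PySem.Str.replace l "\t" ""))).filter
    (fun p => !(p == ("", "")))

-- a pair is not ("", "") iff one of its components is nonempty (the two filter predicates)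
lemma pair_ne_empty (p : String × String) :
    (!(p == (("" : String), ("" : String)))) = (!(p.1 == "") || !(p.2 == "")) := by
  obtain ⟨a, b⟩ := p
  show (!(a == "" && b == "")) = (!(a == "") || !(b == ""))
  cases h1 : (a == "") <;> cases h2 : (b == "") <;> simp

-- A's pipeline after the header skip equals B's fused preprocessing of the same suffix
lemma pipeline_eq (l2 : List String) : postA l2 = pairsB l2 := by
  induction l2 with
  | nil => rfl
  | cons x t ih =>
    unfold postA pairsB at ih ⊢
    simp only [pair_ne_empty] at ih ⊢
    by_cases h1 : (PySem.Str.replace (PySem.Str.replace x "\t" "") " " "" == "") = true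
    · simp only [List.map_cons, List.filter_cons, h1, Bool.not_true, Bool.false_eq_true,
        if_false]
      exact ih
    · have h1' : (PySem.Str.replace (PySem.Str.replace x "\t" "") " " "" == "") = false := by
        simpa using h1
      simp only [List.map_cons, List.filter_cons, h1', Bool.not_false, if_true]
      by_cases h2 : ((!(split_on_comment (PySem.Str.replace x "\t" "")).1 == "")
          || (!(split_on_comment (PySem.Str.replace x "\t" "")).2 == "")) = true
      · simp only [h2, if_true]
        rw [ih]
      · simp only [h2, Bool.false_eq_true, if_false]
        exact ih

-- every pair that survives the last preprocessing filter is not ("", "")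
lemma pairsB_no_empty (l2 : List String) : ∀ p ∈ pairsB l2, p.1 = "" → p.2 ≠ "" := by
  intro p hp h1 h2
  have := (List.mem_filter.mp hp).2
  obtain ⟨a, b⟩ := p
  simp_all

-- header phase: the first "suffixes" hit of the enumerate-filter is where skip_uninteresting stops
lemma skip_eq_enum_aux (l : List String) : ∀ (k : Nat) (full : List String), full.drop k = l →
    skip_uninteresting l =
      (match (PySem.List.enumerate l (k : Int)).filter
          (fun p => PySem.Str.isIn "suffixes" p.2) with
       | [] => []
       | (i, _) :: _ => PySem.List.slice full (some (i + 1)) none) := by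
  induction l with
  | nil => intro k full _; simp [skip_uninteresting, PySem.List.enumerate_nil]
  | cons x xs ih =>
    intro k full hfull
    have hdrop : full.drop (k + 1) = xs := by
      rw [← List.tail_drop, hfull]; rfl
    rw [PySem.List.enumerate_cons, List.filter_cons]
    simp only [skip_uninteresting]
    split_ifs with h
    · show xs = PySem.List.slice full (some ((k : Int) + 1))
      rw [PySem.List.slice_from full (by omega : (0:Int) ≤ (k : Int) + 1),
        show ((k : Int) + 1).toNat = k + 1 by omega, hdrop]
    · rw [show ((k : Int) + 1) = ((k + 1 : Nat) : Int) by push_cast; ring]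
      exact ih (k + 1) full hdrop

lemma skip_eq_enum (full : List String) :
    skip_uninteresting full =
      (match (PySem.List.enumerate full 0).filter
          (fun p => PySem.Str.isIn "suffixes" p.2) with
       | [] => []
       | (i, _) :: _ => PySem.List.slice full (some (i + 1)) none) := by
  simpa using skip_eq_enum_aux full 0 full (by simp)

theorem parse_aff_lines_eq (lines : List String) :
    parse_aff_lines lines = parse_aff_lines_alt lines := by
  have hext : extract_information lines =
      postA (skip_uninteresting (lines.map PySem.Str.strip)) := rfl
  have hskip := skip_eq_enum (lines.map PySem.Str.strip)
  rcases hm : (PySem.List.enumerate (lines.map PySem.Str.strip) 0).filter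
      (fun p => PySem.Str.isIn "suffixes" p.2) with _ | ⟨⟨i, w⟩, rest⟩
  · rw [hm] at hskip
    simp only [parse_aff_lines, parse_aff_lines_alt, hext, hskip, hm]
    rfl
  · rw [hm] at hskip
    have hne := pairsB_no_empty (PySem.List.slice (lines.map PySem.Str.strip) (some (i + 1)) none)
    unfold pairsB at hne
    simp only [parse_aff_lines, parse_aff_lines_alt, hext, hskip, hm, pipeline_eq]
    unfold pairsB
    rw [processB_eq _ _ _ hne]

-- ===== VERDICT (by name: the statement is the Claim_ definition above) =====
theorem parse_aff_lines_spec : Claim_equal_parse_aff_lines := by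
  intro lines _ _
  unfold Spec_parse_aff_lines
  exact parse_aff_lines_eq lines
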